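-- pv_equiv track=rewrite | github.com/AlexandreVASantos/EDC | projeto2/app/views.py | check_if_in_list_ahead
-- ===== SOURCE A (Python) =====
-- def check_if_in_list_ahead(item_list):
--     tmp_list = []
--
--     for i in range(0, len(item_list)):
--         tmp_list.append(item_list[i].split(",")[0])
--
--     for i in range(0, len(tmp_list)):
--
--         if tmp_list[i] in tmp_list[i + 1:]:
--             return True
--
--     return False
-- ===== SOURCE B (Python) =====
-- def check_if_in_list_ahead(item_list):
--     prefixes = [x.split(",")[0] for x in item_list]
--     return len(set(prefixes)) != len(prefixes)
-- ===== Notes on version B (the rewrite author's own statement) =====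
-- stated objective: simpler
-- what changed: Replaces A's two loops (build list, then pairwise suffix-membership scan with early return) with a single comprehension plus one set-cardinality comparison len(set(prefixes)) != len(prefixes).
import Mathlib
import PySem

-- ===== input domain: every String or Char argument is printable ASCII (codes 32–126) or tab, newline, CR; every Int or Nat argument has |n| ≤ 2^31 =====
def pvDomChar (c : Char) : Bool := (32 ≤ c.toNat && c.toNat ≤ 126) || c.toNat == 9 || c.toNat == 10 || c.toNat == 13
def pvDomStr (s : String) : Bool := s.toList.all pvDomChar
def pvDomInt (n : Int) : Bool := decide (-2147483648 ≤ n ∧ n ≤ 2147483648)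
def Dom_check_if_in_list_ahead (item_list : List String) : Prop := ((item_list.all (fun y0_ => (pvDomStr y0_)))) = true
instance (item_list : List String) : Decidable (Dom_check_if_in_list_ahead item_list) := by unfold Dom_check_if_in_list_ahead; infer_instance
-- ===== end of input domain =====

-- B replaces A's suffix-membership scan with a single set-cardinality comparison (simpler).

-- first-comma field: x.split(",")[0]  (split? is some because the separator "," is nonempty,
-- and the resulting list is never empty, so the [0] index never raises)
def pvPrefix (s : String) : String := ((PySem.Str.split? s ",").getD []).headD ""

-- ===== PORT A =====
-- second loop of A: for i, return True if tmp_list[i] appears in tmp_list[i+1:]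
-- (the index loop over tmp_list with its suffix slice, as structural recursion)
def pvAScan : List String → Bool
  | [] => false
  | x :: rest => if rest.contains x then true else pvAScan rest

def check_if_in_list_ahead (item_list : List String) : Bool :=
  let tmp_list := item_list.foldl (fun acc s => acc ++ [pvPrefix s]) []
  pvAScan tmp_list

-- ===== PORT B =====
def check_if_in_list_ahead_alt (item_list : List String) : Bool :=
  let prefixes := item_list.map pvPrefix
  decide (PySem.Set.len (PySem.Set.ofList prefixes) ≠ (prefixes.length : Int))

-- ===== PRECONDITION & SPEC =====
def Spec_check_if_in_list_ahead (item_list : List String) (out : Bool) : Prop := out = check_if_in_list_ahead_alt item_list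
instance (item_list : List String) (out : Bool) : Decidable (Spec_check_if_in_list_ahead item_list out) := by unfold Spec_check_if_in_list_ahead; infer_instance

-- ===== CLAIM (what is proved, stated in full; the proofs are below) =====
def Claim_equal_check_if_in_list_ahead : Prop := ∀ (item_list : List String), Dom_check_if_in_list_ahead item_list → Spec_check_if_in_list_ahead item_list (check_if_in_list_ahead item_list)

-- ===== LEMMAS AND PROOFS =====

-- A's first loop builds exactly the map of pvPrefix
theorem pvFoldlAppendMap (l : List String) (acc : List String) :
    l.foldl (fun acc s => acc ++ [pvPrefix s]) acc = acc ++ l.map pvPrefix := by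
  induction l generalizing acc with
  | nil => simp
  | cons x xs ih => simp [List.foldl, ih]

-- A's scan detects exactly "some element repeats"
theorem pvAScan_iff (l : List String) : pvAScan l = true ↔ ¬ l.Nodup := by
  induction l with
  | nil => simp [pvAScan]
  | cons x xs ih =>
    by_cases hmem : x ∈ xs
    · simp [pvAScan, List.nodup_cons, hmem]
    · simp [pvAScan, ih, List.nodup_cons, hmem]

-- set-cardinality characterisation of Nodup, via PySem.Set.ofList
theorem pvOfListLength_iff (l : List String) :
    (PySem.Set.ofList l).length = l.length ↔ l.Nodup := by
  constructor
  · intro h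
    have hfin : (PySem.Set.ofList l).toFinset = l.toFinset := by
      ext y; simp [List.mem_toFinset, PySem.Set.mem_ofList]
    have h1 : (PySem.Set.ofList l).toFinset.card = (PySem.Set.ofList l).length :=
      List.toFinset_card_of_nodup (PySem.Set.nodup_ofList l)
    have h2 : l.toFinset.card = l.dedup.length := List.card_toFinset l
    have hlen : l.dedup.length = l.length := by
      rw [← h2, ← hfin, h1, h]
    have : l.dedup = l := (List.dedup_sublist l).eq_of_length hlen
    exact List.dedup_eq_self.mp this
  · intro h
    rw [PySem.Set.ofList_eq_self_of_nodup l h]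

theorem check_if_in_list_ahead_eq (item_list : List String) :
    check_if_in_list_ahead item_list = check_if_in_list_ahead_alt item_list := by
  unfold check_if_in_list_ahead check_if_in_list_ahead_alt
  rw [pvFoldlAppendMap]
  simp only [List.nil_append]
  set p := item_list.map pvPrefix with hp
  by_cases h : p.Nodup
  · have hlen := (pvOfListLength_iff p).mpr h
    have hA : pvAScan p = false := by
      cases hAs : pvAScan p
      · rfl
      · exact absurd ((pvAScan_iff p).mp hAs) (not_not.mpr h)
    simp [hA, PySem.Set.len, hlen]
  · have hlen : (PySem.Set.ofList p).length ≠ p.length :=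
      fun hc => h ((pvOfListLength_iff p).mp hc)
    have hA : pvAScan p = true := (pvAScan_iff p).mpr h
    simp [hA, PySem.Set.len]
    omega

-- ===== VERDICT (by name: the statement is the Claim_ definition above) =====
theorem check_if_in_list_ahead_spec : Claim_equal_check_if_in_list_ahead := by
  intro item_list _
  exact check_if_in_list_ahead_eq item_list
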